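-- pv_equiv track=rewrite | github.com/JDJGInc/JDBot | utils/views.py | get_last_operator
-- ===== SOURCE A (Python) =====
-- def get_highest(iterable):
--     resp = 0
--     for i in iterable:
--         if i > resp:
--             resp = i
--     return resp
--
-- def get_last_operator(response: str):
--     try:
--         plus = response.rindex("+")
--     except ValueError:
--         plus = None
--     try:
--         minus = response.rindex("-")
--     except ValueError:
--         minus = None
--     try:
--         mul = response.rindex("*")
--     except ValueError:
--         mul = None
--     try:
--         div = response.rindex("/")
--     except ValueError:
--         div = None
--     valid = [n for n in [plus, minus, mul, div] if n != None]
--     indx = get_highest(valid)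
--     return response[indx:]
-- ===== SOURCE B (Python) =====
-- def get_last_operator(response: str):
--     for i in range(len(response) - 1, -1, -1):
--         if response[i] in "+-*/":
--             return response[i:]
--     return response
-- ===== Notes on version B (the rewrite author's own statement) =====
-- stated objective: simpler
-- what changed: Replaces four try/except rindex scans plus a max-reduction helper with a single reverse scan that returns the suffix at the first operator found (whole string if none).
import Mathlib
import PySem

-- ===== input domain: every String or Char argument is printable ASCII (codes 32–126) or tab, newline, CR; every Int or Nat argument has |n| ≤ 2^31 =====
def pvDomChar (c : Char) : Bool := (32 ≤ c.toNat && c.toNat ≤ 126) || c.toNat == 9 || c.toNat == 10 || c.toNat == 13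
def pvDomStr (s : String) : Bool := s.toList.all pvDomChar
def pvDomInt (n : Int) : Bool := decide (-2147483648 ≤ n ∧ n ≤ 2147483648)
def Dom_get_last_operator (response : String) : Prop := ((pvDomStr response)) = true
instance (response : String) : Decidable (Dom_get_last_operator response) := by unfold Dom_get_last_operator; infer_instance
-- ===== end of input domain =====

-- B replaces A's four separate rindex scans + max helper with one reverse scan (simpler, same return value).

-- ===== PORT A =====
def get_highest (iterable : List Nat) : Nat :=
  iterable.foldl (fun resp i => if i > resp then i else resp) 0

-- hand port of response.rindex(c) for a single-character needle (exact there):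
-- checks positions i-1, i-2, …, 0 in order, returning the first (= highest) index holding c; none = ValueError
def rindexChar (l : List Char) (c : Char) : Nat → Option Nat
  | 0 => none
  | i + 1 => if l.getD i ' ' == c then some i else rindexChar l c i

def get_last_operator (response : String) : String :=
  let l := response.toList
  let plus := rindexChar l '+' l.length
  let minus := rindexChar l '-' l.length
  let mul := rindexChar l '*' l.length
  let div := rindexChar l '/' l.length
  let valid := ([plus, minus, mul, div]).filterMap id
  let indx := get_highest valid
  String.mk (l.drop indx)

-- ===== PORT B =====
-- the loop 'for i in range(len(response)-1, -1, -1)': argument counts the positions still to inspect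
def scanDown (l : List Char) : Nat → String
  | 0 => String.mk l
  | i + 1 =>
    let c := l.getD i ' '
    if c == '+' || c == '-' || c == '*' || c == '/' then String.mk (l.drop i)
    else scanDown l i

def get_last_operator_alt (response : String) : String :=
  scanDown response.toList response.toList.length

-- ===== PRECONDITION & SPEC =====
def Spec_get_last_operator (response : String) (out : String) : Prop := out = get_last_operator_alt response
instance (response : String) (out : String) : Decidable (Spec_get_last_operator response out) := by unfold Spec_get_last_operator; infer_instance

-- ===== CLAIM (what is proved, stated in full; the proofs are below) =====
def Claim_equal_get_last_operator : Prop := ∀ (response : String), Dom_get_last_operator response → Spec_get_last_operator response (get_last_operator response)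

-- ===== LEMMAS AND PROOFS =====

theorem rindexChar_lt (l : List Char) (c : Char) : ∀ i j, rindexChar l c i = some j → j < i := by
  intro i
  induction i with
  | zero => intro j h; simp [rindexChar] at h
  | succ i ih =>
    intro j h
    simp only [rindexChar] at h
    split at h
    · injection h with h'; omega
    · exact Nat.lt_trans (ih j h) (Nat.lt_succ_self i)

theorem rindexChar_getD_le (l : List Char) (c : Char) (i : Nat) :
    (rindexChar l c i).getD 0 ≤ i := by
  cases h : rindexChar l c i with
  | none => simp
  | some j => simpa using Nat.le_of_lt (rindexChar_lt l c i j h)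

theorem get_highest_filterMap (a b c d : Option Nat) :
    get_highest ([a, b, c, d].filterMap id) =
      Nat.max (a.getD 0) (Nat.max (b.getD 0) (Nat.max (c.getD 0) (d.getD 0))) := by
  rcases a <;> rcases b <;> rcases c <;> rcases d <;>
    simp [get_highest, List.foldl, Nat.max_def] <;> (try split_ifs) <;> omega

theorem scanDown_eq (l : List Char) (i : Nat) :
    scanDown l i =
      String.mk (l.drop (Nat.max ((rindexChar l '+' i).getD 0)
        (Nat.max ((rindexChar l '-' i).getD 0)
          (Nat.max ((rindexChar l '*' i).getD 0) ((rindexChar l '/' i).getD 0))))) := by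
  induction i with
  | zero => simp [scanDown, rindexChar]
  | succ i ih =>
    have h1 := rindexChar_getD_le l '+' i
    have h2 := rindexChar_getD_le l '-' i
    have h3 := rindexChar_getD_le l '*' i
    have h4 := rindexChar_getD_le l '/' i
    simp only [scanDown, rindexChar, List.getD]
    by_cases hp : l[i]?.getD ' ' = '+'
    · simp [hp]
      congr 2
      simp only [Nat.max_def]
      split_ifs <;> omega
    · by_cases hm : l[i]?.getD ' ' = '-'
      · simp [hm]
        congr 2
        simp only [Nat.max_def]
        split_ifs <;> omega
      · by_cases hu : l[i]?.getD ' ' = '*'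
        · simp [hu]
          congr 2
          simp only [Nat.max_def]
          split_ifs <;> omega
        · by_cases hd : l[i]?.getD ' ' = '/'
          · simp [hd]
            congr 2
            simp only [Nat.max_def]
            split_ifs <;> omega
          · simp only at ih
            simp [hp, hm, hu, hd, ih]

-- ===== VERDICT (by name: the statement is the Claim_ definition above) =====
theorem get_last_operator_spec : Claim_equal_get_last_operator := by
  intro response _
  show get_last_operator response = get_last_operator_alt response
  simp only [get_last_operator, get_last_operator_alt, scanDown_eq, get_highest_filterMap]
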